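-- pv_equiv track=rewrite | github.com/Netflix/metaflow | metaflow/metadata/metadata.py | _apply_filter
-- ===== SOURCE A (Python) =====
-- def _apply_filter(elts, filters):
--     if filters is None:
--         return elts
--     starting_point = elts
--     result = []
--     for key, value in filters.items():
--         if key == "any_tags":
--             for obj in starting_point:
--                 if value in obj.get("tags", []) or value in obj.get(
--                     "system_tags", []
--                 ):
--                     result.append(obj)
--         if key == "tags":
--             for obj in starting_point:
--                 if value in obj.get("tags", []):
--                     result.append(obj)
--         if key == "system_tags":
--             for obj in starting_point:
--                 if value in obj.get("system_tags", []):
--                     result.append(obj)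
--         starting_point = result
--         result = []
--     return starting_point
-- ===== SOURCE B (Python) =====
-- def _matches(key, value, obj):
--     if key == "any_tags":
--         return value in obj.get("tags", []) or value in obj.get("system_tags", [])
--     if key == "tags":
--         return value in obj.get("tags", [])
--     if key == "system_tags":
--         return value in obj.get("system_tags", [])
--     return False
--
--
-- def _apply_filter(elts, filters):
--     if filters is None:
--         return elts
--     return [obj for obj in elts
--             if all(_matches(k, v, obj) for k, v in filters.items())]
-- ===== Notes on version B (the rewrite author's own statement) =====
-- stated objective: simpler
-- what changed: Replaced the sequential re-filtering loop (one full pass and intermediate list per filter key) by a single list comprehension over elts with a per-object predicate that conjoins all filter criteria.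
import Mathlib
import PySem

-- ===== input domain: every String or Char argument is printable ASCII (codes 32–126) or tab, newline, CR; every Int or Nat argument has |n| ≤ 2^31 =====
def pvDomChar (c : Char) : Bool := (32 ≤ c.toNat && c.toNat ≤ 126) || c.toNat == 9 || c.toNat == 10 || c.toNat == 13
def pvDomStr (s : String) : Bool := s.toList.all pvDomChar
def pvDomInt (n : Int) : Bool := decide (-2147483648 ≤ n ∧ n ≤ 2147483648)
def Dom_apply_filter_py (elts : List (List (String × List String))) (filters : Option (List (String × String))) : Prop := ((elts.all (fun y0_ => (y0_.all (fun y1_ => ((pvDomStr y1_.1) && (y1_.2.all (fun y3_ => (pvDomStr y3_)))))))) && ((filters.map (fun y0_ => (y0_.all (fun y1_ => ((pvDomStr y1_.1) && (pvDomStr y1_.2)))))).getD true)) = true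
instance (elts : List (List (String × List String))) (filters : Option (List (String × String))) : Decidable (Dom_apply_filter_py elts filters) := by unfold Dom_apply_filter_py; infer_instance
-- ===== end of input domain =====

-- B replaces A's sequential per-key re-filtering (one pass and intermediate list per filter key)
-- by a single pass over elts with a conjunction-of-criteria predicate (objective: simpler).
-- ===== PORT A =====
-- obj.get(k, []) on the object dict
def pvGetTags (obj : List (String × List String)) (k : String) : List String :=
  (PySem.Dict.mk obj).getD k []

-- literal port of A: fold over the filter items, each round scanning starting_point
-- and appending the matching objects to a fresh result list (three successive ifs)
-- one iteration of A's `for key, value in filters.items()` loop body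
def pvRound (starting_point : List (List (String × List String))) (kv : String × String) : List (List (String × List String)) :=
      let key := kv.1
      let value := kv.2
      let result : List (List (String × List String)) := []
      let result :=
        if key == "any_tags" then
          starting_point.foldl (fun r obj =>
            if (pvGetTags obj "tags").contains value || (pvGetTags obj "system_tags").contains value
            then r ++ [obj] else r) result
        else result
      let result :=
        if key == "tags" then
          starting_point.foldl (fun r obj =>
            if (pvGetTags obj "tags").contains value then r ++ [obj] else r) result
        else result
      let result :=
        if key == "system_tags" then
          starting_point.foldl (fun r obj =>
            if (pvGetTags obj "system_tags").contains value then r ++ [obj] else r) result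
        else result
      result

def apply_filter_py (elts : List (List (String × List String))) (filters : Option (List (String × String))) : List (List (String × List String)) :=
  match filters with
  | none => elts
  | some fs => fs.foldl pvRound elts

-- ===== PORT B =====
-- B: one pass, keep obj iff it satisfies every filter criterion
def pvMatches (key value : String) (obj : List (String × List String)) : Bool :=
  if key == "any_tags" then
    (pvGetTags obj "tags").contains value || (pvGetTags obj "system_tags").contains value
  else if key == "tags" then (pvGetTags obj "tags").contains value
  else if key == "system_tags" then (pvGetTags obj "system_tags").contains value
  else false

def apply_filter_py_alt (elts : List (List (String × List String))) (filters : Option (List (String × String))) : List (List (String × List String)) :=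
  match filters with
  | none => elts
  | some fs => elts.filter (fun obj => fs.all (fun kv => pvMatches kv.1 kv.2 obj))

-- ===== PRECONDITION & SPEC =====
def Spec_apply_filter_py (elts : List (List (String × List String))) (filters : Option (List (String × String))) (out : List (List (String × List String))) : Prop := out = apply_filter_py_alt elts filters
instance (elts : List (List (String × List String))) (filters : Option (List (String × String))) (out : List (List (String × List String))) : Decidable (Spec_apply_filter_py elts filters out) := by unfold Spec_apply_filter_py; infer_instance

-- ===== CLAIM (what is proved, stated in full; the proofs are below) =====
def Claim_equal_apply_filter_py : Prop := ∀ (elts : List (List (String × List String))) (filters : Option (List (String × String))), Dom_apply_filter_py elts filters → Spec_apply_filter_py elts filters (apply_filter_py elts filters)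

-- ===== LEMMAS AND PROOFS =====

-- appending matches equals filter
theorem pvFoldFilter {α : Type} (p : α → Prop) [DecidablePred p] (l acc : List α) :
    l.foldl (fun r o => if p o then r ++ [o] else r) acc = acc ++ l.filter (fun o => decide (p o)) := by
  induction l generalizing acc with
  | nil => simp
  | cons a t ih =>
    simp only [List.foldl_cons, List.filter_cons]
    by_cases h : p a <;> simp [h, ih]

-- one round of A's loop is a filter by pvMatches
theorem pvStep (sp : List (List (String × List String))) (kv : String × String) :
    pvRound sp kv = sp.filter (fun obj => pvMatches kv.1 kv.2 obj) := by
  simp only [pvRound, pvMatches]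
  by_cases h1 : kv.1 == "any_tags"
  · have h2 : ¬ (kv.1 == "tags") := by simp_all
    have h3 : ¬ (kv.1 == "system_tags") := by simp_all
    simp only [h1, h2, h3, if_true, if_false, Bool.false_eq_true]
    simpa using pvFoldFilter
      (fun obj => kv.2 ∈ pvGetTags obj "tags" ∨ kv.2 ∈ pvGetTags obj "system_tags") sp []
  · by_cases h2 : kv.1 == "tags"
    · have h3 : ¬ (kv.1 == "system_tags") := by simp_all
      simp only [h1, h2, h3, Bool.false_eq_true, reduceIte, if_true]
      simpa using pvFoldFilter (fun obj => kv.2 ∈ pvGetTags obj "tags") sp []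
    · by_cases h3 : kv.1 == "system_tags"
      · simp only [h1, h2, h3, Bool.false_eq_true, reduceIte, if_true]
        simpa using pvFoldFilter (fun obj => kv.2 ∈ pvGetTags obj "system_tags") sp []
      · simp [h1, h2, h3]

theorem pvMain (fs : List (String × String)) (elts : List (List (String × List String))) :
    fs.foldl pvRound elts = elts.filter (fun o => fs.all (fun kv => pvMatches kv.1 kv.2 o)) := by
  induction fs generalizing elts with
  | nil => simp
  | cons a t ih =>
    rw [List.foldl_cons, pvStep, ih, List.filter_filter]
    congr 1
    funext o
    simp [Bool.and_comm]

-- ===== VERDICT (by name: the statement is the Claim_ definition above) =====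
theorem apply_filter_py_spec : Claim_equal_apply_filter_py := by
  intro elts filters _
  unfold Spec_apply_filter_py apply_filter_py apply_filter_py_alt
  cases filters with
  | none => rfl
  | some fs => exact pvMain fs elts
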